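-- pv_equiv track=rewrite | github.com/Ananikov-Lab/QM9 | cli_scripts/mining_pubchem/generate_templates.py | cmpd_generate
-- ===== SOURCE A (Python) =====
-- def cmpd_generate(smiles, cnt, type_cmpd='non-cycle'):
--     """There is an enumeration of all possible options for the multiplicity of bonds within the compounds"""
--     list_smiles = []
--     if cnt == 0:
--         if type_cmpd == 'non-cycle':
--             cmpd = smiles + '*'
--             list_smiles += [cmpd]
--             return list_smiles
--         elif type_cmpd == 'cycle':
--             for end_bond in ['#', '=', '']:
--                 cmpd = '*1' + smiles[1:] + '*' + end_bond + '1'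
--                 list_smiles += [cmpd]
--             return list_smiles
--         else:
--             raise ValueError
--     else:
--         for bond in ['#', '=', '']:
--             cmpd = smiles + '*' + bond
--             list_smiles += cmpd_generate(cmpd, cnt - 1, type_cmpd)
--             cmpd = smiles
--         return list_smiles
-- ===== SOURCE B (Python) =====
-- import itertools
--
-- def cmpd_generate(smiles, cnt, type_cmpd='non-cycle'):
--     """Iterative enumeration: one itertools.product pass instead of recursion."""
--     if type_cmpd not in ('non-cycle', 'cycle'):
--         raise ValueError
--     out = []
--     for combo in itertools.product(['#', '=', ''], repeat=cnt):
--         prefix = smiles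
--         for b in combo:
--             prefix += '*' + b
--         if type_cmpd == 'non-cycle':
--             out.append(prefix + '*')
--         else:
--             for end_bond in ['#', '=', '']:
--                 out.append('*1' + prefix[1:] + '*' + end_bond + '1')
--     return out
-- ===== Notes on version B (the rewrite author's own statement) =====
-- stated objective: alternative
-- what changed: Replaces the recursion with a single iterative pass over itertools.product(['#','=',''], repeat=cnt), building each variant from its bond tuple.
import Mathlib
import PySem

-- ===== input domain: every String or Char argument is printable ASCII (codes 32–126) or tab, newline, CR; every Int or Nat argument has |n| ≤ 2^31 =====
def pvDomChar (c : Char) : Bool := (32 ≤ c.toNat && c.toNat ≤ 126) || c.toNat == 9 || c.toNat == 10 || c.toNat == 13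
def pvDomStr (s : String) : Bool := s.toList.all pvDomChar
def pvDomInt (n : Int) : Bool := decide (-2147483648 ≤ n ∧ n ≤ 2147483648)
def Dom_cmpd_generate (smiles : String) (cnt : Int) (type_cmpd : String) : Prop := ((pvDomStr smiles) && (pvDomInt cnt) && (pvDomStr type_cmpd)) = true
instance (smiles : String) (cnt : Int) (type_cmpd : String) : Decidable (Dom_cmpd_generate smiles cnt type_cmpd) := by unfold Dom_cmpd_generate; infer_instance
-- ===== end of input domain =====

-- B replaces A's recursion with one iterative pass over the 3^cnt bond tuples (product order); same outputs, same order.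

-- ===== PORT A =====
-- Literal port of A's recursion; the Nat fuel (cnt.toNat) only makes the recursion
-- well-founded — for cnt ≥ 0 it is exactly A's recursion depth, cnt < 0 (where A
-- diverges) is outside Pre_.
def cmpd_generate_go (type_cmpd : String) : Nat → String → Int → List String
  | fuel, smiles, cnt =>
    if cnt == 0 then
      if type_cmpd == "non-cycle" then [smiles ++ "*"]
      else if type_cmpd == "cycle" then
        ["#", "=", ""].foldl
          (fun acc end_bond => acc ++ ["*1" ++ PySem.Str.slice smiles (some 1) none ++ "*" ++ end_bond ++ "1"]) []
      else []  -- raise ValueError: outside Pre_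
    else
      match fuel with
      | 0 => []  -- unreachable for cnt ≥ 0
      | f + 1 =>
        ["#", "=", ""].foldl
          (fun acc bond => acc ++ cmpd_generate_go type_cmpd f (smiles ++ "*" ++ bond) (cnt - 1)) []

def cmpd_generate (smiles : String) (cnt : Int) (type_cmpd : String) : List String :=
  cmpd_generate_go type_cmpd cnt.toNat smiles cnt

-- ===== PORT B =====
-- itertools.product(['#','=',''], repeat=n), in product order
def pvCombos : Nat → List (List String)
  | 0 => [[]]
  | n + 1 => ["#", "=", ""].flatMap (fun b => (pvCombos n).map (fun r => b :: r))

def cmpd_generate_alt (smiles : String) (cnt : Int) (type_cmpd : String) : List String :=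
  if type_cmpd ≠ "non-cycle" ∧ type_cmpd ≠ "cycle" then []  -- raise ValueError: outside Pre_
  else
    (pvCombos cnt.toNat).flatMap (fun combo =>
      let pref := combo.foldl (fun acc b => acc ++ "*" ++ b) smiles
      if type_cmpd == "non-cycle" then [pref ++ "*"]
      else ["#", "=", ""].map (fun end_bond => "*1" ++ PySem.Str.slice pref (some 1) none ++ "*" ++ end_bond ++ "1"))

-- ===== PRECONDITION & SPEC =====
-- A raises ValueError for type_cmpd outside {'non-cycle','cycle'} and recurses
-- forever (RecursionError) for cnt < 0; Pre_ excludes exactly those inputs.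
def Pre_cmpd_generate (smiles : String) (cnt : Int) (type_cmpd : String) : Prop :=
  0 ≤ cnt ∧ (type_cmpd = "non-cycle" ∨ type_cmpd = "cycle")
instance (smiles : String) (cnt : Int) (type_cmpd : String) : Decidable (Pre_cmpd_generate smiles cnt type_cmpd) := by unfold Pre_cmpd_generate; infer_instance

def pvWitness_cmpd_generate : String × Int × String := ("CC", 2, "cycle")

def Spec_cmpd_generate (smiles : String) (cnt : Int) (type_cmpd : String) (out : List String) : Prop := out = cmpd_generate_alt smiles cnt type_cmpd
instance (smiles : String) (cnt : Int) (type_cmpd : String) (out : List String) : Decidable (Spec_cmpd_generate smiles cnt type_cmpd out) := by unfold Spec_cmpd_generate; infer_instance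

-- ===== CLAIM (what is proved, stated in full; the proofs are below) =====
def Claim_equal_cmpd_generate : Prop := ∀ (smiles : String) (cnt : Int) (type_cmpd : String), Dom_cmpd_generate smiles cnt type_cmpd → Pre_cmpd_generate smiles cnt type_cmpd → Spec_cmpd_generate smiles cnt type_cmpd (cmpd_generate smiles cnt type_cmpd)

-- ===== LEMMAS AND PROOFS =====

-- body of B after the ValueError guard
def pvAltBody (smiles : String) (n : Nat) (type_cmpd : String) : List String :=
  (pvCombos n).flatMap (fun combo =>
    let pref := combo.foldl (fun acc b => acc ++ "*" ++ b) smiles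
    if type_cmpd == "non-cycle" then [pref ++ "*"]
    else ["#", "=", ""].map (fun end_bond => "*1" ++ PySem.Str.slice pref (some 1) none ++ "*" ++ end_bond ++ "1"))

lemma pv_go_eq (type_cmpd : String)
    (ht : type_cmpd = "non-cycle" ∨ type_cmpd = "cycle") :
    ∀ (n : Nat) (smiles : String),
      cmpd_generate_go type_cmpd n smiles (n : Int) = pvAltBody smiles n type_cmpd := by
  intro n
  induction n with
  | zero =>
    intro smiles
    rcases ht with h | h <;> subst h <;>
      simp [cmpd_generate_go, pvAltBody, pvCombos, List.foldl]
  | succ n ih =>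
    intro smiles
    have hne : ((n : Int) + 1 == 0) = false := by
      simp
      omega
    rw [cmpd_generate_go]
    push_cast
    rw [hne]
    simp only [Bool.false_eq_true, if_false]
    have harg : ((n : Int) + 1 - 1) = (n : Int) := by ring
    simp only [harg]
    rw [pvAltBody]
    show _ = (pvCombos (n+1)).flatMap _
    simp [pvCombos, List.foldl, ih, pvAltBody, List.flatMap_cons, List.flatMap_nil,
      List.flatMap_map]

-- ===== VERDICT (by name: the statement is the Claim_ definition above) =====
theorem cmpd_generate_spec : Claim_equal_cmpd_generate := by
  intro smiles cnt type_cmpd _ hpre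
  obtain ⟨hc, ht⟩ := hpre
  unfold Spec_cmpd_generate cmpd_generate cmpd_generate_alt
  have hcnt : cnt = ((cnt.toNat : Nat) : Int) := by omega
  have hguard : ¬ (type_cmpd ≠ "non-cycle" ∧ type_cmpd ≠ "cycle") := by
    rcases ht with h | h <;> simp [h]
  rw [if_neg hguard]
  rw [hcnt] at *
  exact pv_go_eq type_cmpd ht cnt.toNat smiles
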